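-- pv_equiv track=rewrite | github.com/boris-epstein/fulfillment-optimization | src/fulfillment_optimization/model_based.py | generate_bounded_tuples_with_sum
-- ===== SOURCE A (Python) =====
-- def generate_bounded_tuples_with_sum(initial_tuple, T, current_tuple=(), index=0, current_sum=0):
--     """Generate bounded tuples whose elements sum to at least T.
--
--     Used to enumerate feasible inventory states: each component is bounded by
--     the initial inventory, and the total remaining inventory must be at least T
--     (since at most one unit is consumed per time step).
--
--     Args:
--         initial_tuple: Upper bounds for each position (initial inventory levels).
--         T: Minimum required sum.
--         current_tuple: Partial tuple built so far (internal recursion state).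
--         index: Current position being filled (internal recursion state).
--         current_sum: Running sum of elements so far (internal recursion state).
--
--     Yields:
--         Tuples satisfying the element bounds and minimum sum constraint.
--     """
--     if index == len(initial_tuple):
--         if current_sum >= T:
--             yield current_tuple
--         return
--
--     min_required = max(0, T - current_sum - sum(initial_tuple[index + 1:]))
--
--     for value in range(min_required, initial_tuple[index] + 1):
--         yield from generate_bounded_tuples_with_sum(
--             initial_tuple, T, current_tuple + (value,), index + 1, current_sum + value
--         )
-- ===== SOURCE B (Python) =====
-- def generate_bounded_tuples_with_sum(initial_tuple, T, current_tuple=(), index=0, current_sum=0):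
--     """Iterative level-by-level enumeration with precomputed suffix sums.
--
--     Builds the tuples breadth-first across positions (values ascending, so the
--     output order is the same lexicographic order as the recursive version) and
--     reads the remaining-capacity suffix sum from an array built once instead of
--     re-summing the tail of initial_tuple at every node.
--     """
--     n = len(initial_tuple)
--     suffix = [0] * (n + 1)
--     for i in range(n - 1, -1, -1):
--         suffix[i] = suffix[i + 1] + initial_tuple[i]
--     level = [(tuple(current_tuple), current_sum)]
--     for i in range(index, n):
--         bound = initial_tuple[i]
--         nxt = []
--         for tup, s in level:
--             lo = max(0, T - s - suffix[i + 1])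
--             for v in range(lo, bound + 1):
--                 nxt.append((tup + (v,), s + v))
--         level = nxt
--     for tup, s in level:
--         if s >= T:
--             yield tup
-- ===== Notes on version B (the rewrite author's own statement) =====
-- stated objective: alternative
-- what changed: Replaces the recursive generator that re-sums initial_tuple[index+1:] at every node with an iterative level-by-level product build over the positions, using a suffix-sum array precomputed once for the min_required lookup; measured cost is similar.
import Mathlib
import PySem

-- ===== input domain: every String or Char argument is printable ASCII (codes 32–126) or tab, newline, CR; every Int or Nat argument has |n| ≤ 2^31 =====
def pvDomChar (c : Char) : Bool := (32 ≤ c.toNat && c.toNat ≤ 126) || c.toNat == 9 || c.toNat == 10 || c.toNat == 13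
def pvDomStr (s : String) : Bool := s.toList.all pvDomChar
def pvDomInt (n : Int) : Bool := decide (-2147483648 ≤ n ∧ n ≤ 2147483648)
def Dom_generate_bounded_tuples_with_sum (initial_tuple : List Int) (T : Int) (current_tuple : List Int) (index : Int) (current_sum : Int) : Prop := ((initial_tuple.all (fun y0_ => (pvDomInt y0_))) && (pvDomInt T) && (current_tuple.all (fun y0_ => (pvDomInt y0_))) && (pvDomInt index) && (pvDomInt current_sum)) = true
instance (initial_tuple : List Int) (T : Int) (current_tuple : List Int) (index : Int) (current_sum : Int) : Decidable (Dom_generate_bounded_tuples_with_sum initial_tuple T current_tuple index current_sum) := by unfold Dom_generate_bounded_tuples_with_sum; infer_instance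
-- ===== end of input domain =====

-- B (alternative) replaces A's recursion (which re-sums initial_tuple[index+1:] at every node)
-- by an iterative level-by-level build over the positions with a suffix-sum array built once;
-- both are materialised here as the list of yielded tuples (the Pythons are generators).

-- ===== PORT A =====
-- Literal port of A's recursive generator; the yielded tuples are collected into a list.
def generate_bounded_tuples_with_sum (initial_tuple : List Int) (T : Int) (current_tuple : List Int) (index : Int) (current_sum : Int) : List (List Int) :=
  if index = (initial_tuple.length : Int) then
    (if T ≤ current_sum then [current_tuple] else [])
  else
    match h : PySem.List.pyGet? initial_tuple index with
    | none => []  -- Python raises IndexError on initial_tuple[index] here; excluded by Pre_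
    | some bound =>
      let min_required := max 0 (T - current_sum - (PySem.List.slice initial_tuple (some (index + 1)) none).sum)
      (PySem.List.pyRange min_required (bound + 1) 1).flatMap
        (fun v => generate_bounded_tuples_with_sum initial_tuple T (current_tuple ++ [v]) (index + 1) (current_sum + v))
termination_by ((initial_tuple.length : Int) - index).toNat
decreasing_by
  have hin : PySem.Raise.InRange initial_tuple.length index := by
    by_contra hc
    rw [(PySem.List.pyGet?_eq_none_iff initial_tuple index).mpr hc] at h
    simp at h
  unfold PySem.Raise.InRange at hin
  omega

-- ===== PORT B =====
-- suffix[i] = suffix[i+1] + initial_tuple[i], built once (B's descending loop)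
def pvSuffix : List Int → List Int
  | [] => [0]
  | x :: t => (x + (pvSuffix t).headD 0) :: pvSuffix t

-- the body of B's loop over positions: expand every partial tuple of the level by one value
def pvStep (initial_tuple suffix : List Int) (T : Int) (lvl : List (List Int × Int)) (i : Int) : List (List Int × Int) :=
  let bound := PySem.List.pyGetD initial_tuple i 0
  lvl.flatMap (fun ts =>
    let lo := max 0 (T - ts.2 - PySem.List.pyGetD suffix (i + 1) 0)
    (PySem.List.pyRange lo (bound + 1) 1).map (fun v => (ts.1 ++ [v], ts.2 + v)))

def generate_bounded_tuples_with_sum_alt (initial_tuple : List Int) (T : Int) (current_tuple : List Int) (index : Int) (current_sum : Int) : List (List Int) :=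
  ((((PySem.List.pyRange index (initial_tuple.length : Int) 1).foldl
      (pvStep initial_tuple (pvSuffix initial_tuple) T)
      [(current_tuple, current_sum)]).filter
     (fun ts => decide (T ≤ ts.2))).map Prod.fst)

-- ===== PRECONDITION & SPEC =====
-- Pre_ excludes negative index values (on which A returns via Python's accidental negative-index
-- wraparound of initial_tuple[index] / initial_tuple[index+1:]) and index > len (on which A raises
-- IndexError): index is internal recursion state, naturally in [0, len(initial_tuple)].
def Pre_generate_bounded_tuples_with_sum (initial_tuple : List Int) (T : Int) (current_tuple : List Int) (index : Int) (current_sum : Int) : Prop :=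
  0 ≤ index ∧ index ≤ (initial_tuple.length : Int)
instance (initial_tuple : List Int) (T : Int) (current_tuple : List Int) (index : Int) (current_sum : Int) : Decidable (Pre_generate_bounded_tuples_with_sum initial_tuple T current_tuple index current_sum) := by unfold Pre_generate_bounded_tuples_with_sum; infer_instance

def pvWitness_generate_bounded_tuples_with_sum : List Int × Int × List Int × Int × Int := ([2, 1], 2, [], 0, 0)

def Spec_generate_bounded_tuples_with_sum (initial_tuple : List Int) (T : Int) (current_tuple : List Int) (index : Int) (current_sum : Int) (out : List (List Int)) : Prop := out = generate_bounded_tuples_with_sum_alt initial_tuple T current_tuple index current_sum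
instance (initial_tuple : List Int) (T : Int) (current_tuple : List Int) (index : Int) (current_sum : Int) (out : List (List Int)) : Decidable (Spec_generate_bounded_tuples_with_sum initial_tuple T current_tuple index current_sum out) := by unfold Spec_generate_bounded_tuples_with_sum; infer_instance

-- ===== CLAIM (what is proved, stated in full; the proofs are below) =====
def Claim_equal_generate_bounded_tuples_with_sum : Prop := ∀ (initial_tuple : List Int) (T : Int) (current_tuple : List Int) (index : Int) (current_sum : Int), Dom_generate_bounded_tuples_with_sum initial_tuple T current_tuple index current_sum → Pre_generate_bounded_tuples_with_sum initial_tuple T current_tuple index current_sum → Spec_generate_bounded_tuples_with_sum initial_tuple T current_tuple index current_sum (generate_bounded_tuples_with_sum initial_tuple T current_tuple index current_sum)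

-- ===== LEMMAS AND PROOFS =====

-- pvSuffix lists the suffix sums: entry k is the sum of the last (length - k) elements
lemma pvSuffix_getD (xs : List Int) (k : Nat) (hk : k ≤ xs.length) :
    (pvSuffix xs).getD k 0 = (xs.drop k).sum := by
  induction xs generalizing k with
  | nil =>
    have : k = 0 := by simpa using hk
    subst this; simp [pvSuffix]
  | cons x t ih =>
    cases k with
    | zero =>
      have h0 := ih 0 (by omega)
      simp [pvSuffix] at h0 ⊢
      cases ht : pvSuffix t with
      | nil => simp [ht] at h0; simp [← h0]
      | cons a s => simp [ht] at h0; simp [h0]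
    | succ k =>
      simp only [List.length_cons] at hk
      simpa [pvSuffix] using ih k (by omega)

-- the fold of pvStep distributes over the level: each partial tuple evolves independently
lemma foldl_pvStep_flatMap (init suf : List Int) (T : Int) (is : List Int) :
    ∀ lvl : List (List Int × Int),
      is.foldl (pvStep init suf T) lvl = lvl.flatMap (fun ts => is.foldl (pvStep init suf T) [ts]) := by
  induction is with
  | nil => intro lvl; simp
  | cons i is ih =>
    intro lvl
    simp only [List.foldl_cons]
    rw [ih (pvStep init suf T lvl i)]
    have hsplit : (pvStep init suf T lvl i).flatMap (fun ts => is.foldl (pvStep init suf T) [ts]) =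
        lvl.flatMap (fun ts => (pvStep init suf T [ts] i).flatMap (fun u => is.foldl (pvStep init suf T) [u])) := by
      simp only [pvStep, List.flatMap_assoc, List.flatMap_cons, List.flatMap_nil, List.append_nil]
    rw [hsplit]
    exact List.flatMap_congr (fun ts _ => (ih (pvStep init suf T [ts] i)).symm)

-- the main invariant: A's recursion equals B's fold from any in-range position
lemma gbt_eq_fold (init : List Int) (T : Int) :
    ∀ (fuel : Nat) (i : Int), ((init.length : Int) - i).toNat = fuel → 0 ≤ i → i ≤ (init.length : Int) →
    ∀ (cur : List Int) (s : Int),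
      generate_bounded_tuples_with_sum init T cur i s =
        ((((PySem.List.pyRange i (init.length : Int) 1).foldl
            (pvStep init (pvSuffix init) T) [(cur, s)]).filter
           (fun ts => decide (T ≤ ts.2))).map Prod.fst) := by
  intro fuel
  induction fuel with
  | zero =>
    intro i hf h0 hl cur s
    have hi : i = (init.length : Int) := by omega
    subst hi
    rw [generate_bounded_tuples_with_sum]
    simp
    by_cases hT : T ≤ s <;> simp [hT]
  | succ fuel ih =>
    intro i hf h0 hl cur s
    have hlt : i < (init.length : Int) := by omega
    rw [generate_bounded_tuples_with_sum]
    rw [if_neg (by omega)]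
    have hsome : PySem.List.pyGet? init i = some (init[i.toNat]'(by omega)) :=
      PySem.List.pyGet?_eq_some_getElem init h0 hlt
    rw [hsome]
    -- identify A's min_required with B's suffix-array lookup
    have hsuf : PySem.List.pyGetD (pvSuffix init) (i + 1) 0 = (PySem.List.slice init (some (i + 1)) none).sum := by
      rw [PySem.List.slice_from init (by omega)]
      have : (i + 1) = ((i + 1).toNat : Int) := by omega
      rw [this, PySem.List.pyGetD_natCast]
      exact pvSuffix_getD init (i + 1).toNat (by omega)
    have hbound : PySem.List.pyGetD init i 0 = init[i.toNat]'(by omega) :=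
      PySem.List.pyGetD_eq_getElem init 0 h0 hlt
    -- unfold one step of the fold on the right
    rw [PySem.List.pyRange_one_cons hlt]
    simp only [List.foldl_cons]
    rw [foldl_pvStep_flatMap]
    have hsingle : pvStep init (pvSuffix init) T [(cur, s)] i =
        (PySem.List.pyRange (max 0 (T - s - (PySem.List.slice init (some (i + 1)) none).sum))
            ((init[i.toNat]'(by omega)) + 1) 1).map (fun v => (cur ++ [v], s + v)) := by
      simp [pvStep, hsuf, hbound]
    rw [hsingle, List.flatMap_map, List.filter_flatMap, List.map_flatMap]
    refine List.flatMap_congr ?_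
    intro v _
    exact ih (i + 1) (by omega) (by omega) (by omega) (cur ++ [v]) (s + v)

-- ===== VERDICT (by name: the statement is the Claim_ definition above) =====
theorem generate_bounded_tuples_with_sum_spec : Claim_equal_generate_bounded_tuples_with_sum := by
  intro init T cur index s _ hpre
  unfold Spec_generate_bounded_tuples_with_sum generate_bounded_tuples_with_sum_alt
  exact gbt_eq_fold init T (((init.length : Int) - index).toNat) index rfl hpre.1 hpre.2 cur s
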